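-- pv_equiv track=rewrite | github.com/MariaTheresaAzzi/Simplified-DES-CBC-Python | utils.py | split_bits_into_blocks
-- ===== SOURCE A (Python) =====
-- def split_bits_into_blocks(bits, block_size):
--     blocks = []
--     for i in range(0, len(bits), block_size):
--         block = bits[i:i+block_size]
--         if len(block) < block_size:
--             block += [0] * (block_size - len(block))  # padding with zeros
--         blocks.append(block)
--     return blocks
-- ===== SOURCE B (Python) =====
-- def split_bits_into_blocks(bits, block_size):
--     if block_size <= 0:
--         return []
--     if not bits:
--         return []
--     head = bits[:block_size]
--     head = head + [0] * (block_size - len(head))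
--     return [head] + split_bits_into_blocks(bits[block_size:], block_size)
-- ===== Notes on version B (the rewrite author's own statement) =====
-- stated objective: alternative
-- what changed: Replaces A's index-arithmetic loop over range(0, len(bits), block_size) with a structural recursion that repeatedly splits off the first block_size elements (take/drop) with no index computation at all.
import Mathlib
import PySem

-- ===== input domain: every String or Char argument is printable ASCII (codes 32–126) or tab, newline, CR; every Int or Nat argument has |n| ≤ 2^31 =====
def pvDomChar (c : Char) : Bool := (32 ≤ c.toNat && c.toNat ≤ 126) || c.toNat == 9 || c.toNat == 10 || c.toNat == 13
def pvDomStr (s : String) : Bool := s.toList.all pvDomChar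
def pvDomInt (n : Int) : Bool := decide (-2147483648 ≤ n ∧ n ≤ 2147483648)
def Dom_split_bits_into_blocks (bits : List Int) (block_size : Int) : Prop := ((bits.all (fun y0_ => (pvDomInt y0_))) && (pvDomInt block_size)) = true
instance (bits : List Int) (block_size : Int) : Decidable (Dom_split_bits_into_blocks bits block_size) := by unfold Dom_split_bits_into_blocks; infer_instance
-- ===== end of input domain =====

-- B replaces A's index loop over range(0, len, block_size) with a structural recursion
-- peeling off the first block (take/drop) at each step; objective: alternative decomposition.

-- ===== PORT A =====
def split_bits_into_blocks (bits : List Int) (block_size : Int) : List (List Int) :=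
  (PySem.List.pyRange 0 (bits.length : Int) block_size).foldl
    (fun blocks i =>
      let block := PySem.List.slice bits (some i) (some (i + block_size))
      let block :=
        if (block.length : Int) < block_size then
          block ++ List.replicate (block_size - (block.length : Int)).toNat 0
        else block
      blocks ++ [block]) []

-- ===== PORT B =====
def split_bits_into_blocks_alt (bits : List Int) (block_size : Int) : List (List Int) :=
  if _h : block_size ≤ 0 then []
  else if _hb : bits = [] then []
  else
    let head := PySem.List.slice bits none (some block_size)
    (head ++ List.replicate (block_size - (head.length : Int)).toNat 0) ::
      split_bits_into_blocks_alt (PySem.List.slice bits (some block_size) none) block_size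
termination_by bits.length
decreasing_by
  rw [PySem.List.slice_from bits (by omega : (0:Int) ≤ block_size)]
  have hlen : 0 < bits.length := List.length_pos_iff.mpr _hb
  simp only [List.length_drop]
  omega

-- ===== PRECONDITION & SPEC =====
-- Pre_ excludes exactly block_size = 0, on which Python A raises ValueError (range() step 0).
def Pre_split_bits_into_blocks (bits : List Int) (block_size : Int) : Prop := block_size ≠ 0
instance (bits : List Int) (block_size : Int) : Decidable (Pre_split_bits_into_blocks bits block_size) := by unfold Pre_split_bits_into_blocks; infer_instance
def pvWitness_split_bits_into_blocks : List Int × Int := ([1, 0, 1], 2)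

def Spec_split_bits_into_blocks (bits : List Int) (block_size : Int) (out : List (List Int)) : Prop := out = split_bits_into_blocks_alt bits block_size
instance (bits : List Int) (block_size : Int) (out : List (List Int)) : Decidable (Spec_split_bits_into_blocks bits block_size out) := by unfold Spec_split_bits_into_blocks; infer_instance

-- ===== CLAIM (what is proved, stated in full; the proofs are below) =====
def Claim_equal_split_bits_into_blocks : Prop := ∀ (bits : List Int) (block_size : Int), Dom_split_bits_into_blocks bits block_size → Pre_split_bits_into_blocks bits block_size → Spec_split_bits_into_blocks bits block_size (split_bits_into_blocks bits block_size)

-- ===== LEMMAS AND PROOFS =====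

-- A's per-index block (conditionally padded slice starting at bs*k)
def pvG (bits : List Int) (bs : Int) (k : Nat) : List Int :=
  let block := PySem.List.slice bits (some (bs * (k : Int))) (some (bs * (k : Int) + bs))
  if (block.length : Int) < bs then block ++ List.replicate (bs - (block.length : Int)).toNat 0
  else block

-- range(0, n, bs) is empty for a negative step and non-negative stop
theorem pv_pyRange_neg_nil (n bs : Int) (h0 : 0 ≤ n) (hb : bs < 0) :
    PySem.List.pyRange 0 n bs = [] := by
  unfold PySem.List.pyRange
  have h1 : bs ≠ 0 := by omega
  have h2 : ¬ (0 < bs) := by omega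
  have h3 : ¬ (n < 0) := by omega
  simp [h1, h2, h3]

-- A as a map of pvG over block indices
theorem pv_A_eq_map (bits : List Int) (bs : Int) (hpos : 0 < bs) :
    split_bits_into_blocks bits bs
      = (List.range (if 0 < (bits.length : Int) then (((bits.length : Int) + bs - 1) / bs).toNat else 0)).map
          (pvG bits bs) := by
  unfold split_bits_into_blocks
  rw [PySem.List.pyRange_of_pos 0 (bits.length : Int) hpos]
  rw [List.foldl_map, PySem.List.foldl_append_singleton_eq_map]
  simp only [List.nil_append, sub_zero, zero_add]
  exact List.map_congr_left (fun k _ => rfl)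

-- shifting one block: pvG at index k+1 on bits is pvG at index k on the tail
theorem pv_G_shift (bits : List Int) (bs : Int) (hpos : 0 < bs) (k : Nat) :
    pvG bits bs (k + 1) = pvG (bits.drop bs.toNat) bs k := by
  have h0 : (0:Int) ≤ bs * ((k:Int) + 1) := by positivity
  have h0' : (0:Int) ≤ bs * (k:Int) := by positivity
  have hs : PySem.List.slice bits (some (bs * ((k:Int) + 1))) (some (bs * ((k:Int) + 1) + bs))
      = PySem.List.slice (bits.drop bs.toNat) (some (bs * (k:Int))) (some (bs * (k:Int) + bs)) := by
    rw [PySem.List.slice_toNat bits h0 (by nlinarith), PySem.List.slice_toNat _ h0' (by nlinarith)]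
    rw [List.drop_drop]
    have hridge : bs * ((k:Int) + 1) = bs * (k:Int) + bs := by ring
    have e1 : bs.toNat + (bs * (k:Int)).toNat = (bs * ((k:Int) + 1)).toNat := by omega
    have e2 : (bs * ((k:Int) + 1) + bs).toNat - (bs * ((k:Int) + 1)).toNat = bs.toNat := by omega
    have e3 : (bs * (k:Int) + bs).toNat - (bs * (k:Int)).toNat = bs.toNat := by omega
    rw [e1, e2, e3]
  unfold pvG
  push_cast
  rw [hs]

-- number of blocks of the tail is one less
theorem pv_q_shift (n bs : Int) (hpos : 0 < bs) (hn : 0 < n) :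
    ((n + bs - 1) / bs).toNat = (if 0 < n - bs then ((n - bs + bs - 1) / bs).toNat else 0) + 1 := by
  have hq : (n + bs - 1) / bs = (n - 1) / bs + 1 := by
    have h := Int.add_mul_ediv_right (n - 1) 1 (by omega : bs ≠ 0)
    simp only [one_mul] at h
    rw [show n + bs - 1 = n - 1 + bs by ring, h]
  have hq0 : 0 ≤ (n - 1) / bs := Int.ediv_nonneg (by omega) hpos.le
  by_cases hnb : 0 < n - bs
  · rw [if_pos hnb, show n - bs + bs - 1 = n - 1 by ring, hq]
    omega
  · have hz : (n - 1) / bs = 0 := Int.ediv_eq_zero_of_lt (by omega) (by omega)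
    rw [if_neg hnb, hq, hz]
    rfl

-- the first block of A equals B's head block, padded unconditionally
theorem pv_G_zero (bits : List Int) (bs : Int) :
    pvG bits bs 0
      = PySem.List.slice bits none (some bs)
        ++ List.replicate (bs - ((PySem.List.slice bits none (some bs)).length : Int)).toNat 0 := by
  unfold pvG
  simp only [Int.natCast_zero, mul_zero, zero_add, PySem.List.slice_zero_start]
  split_ifs with h
  · rfl
  · have : (bs - ((PySem.List.slice bits none (some bs)).length : Int)).toNat = 0 := by omega
    rw [this]
    simp

theorem pv_main (bs : Int) (hpos : 0 < bs) :
    ∀ bits : List Int, split_bits_into_blocks bits bs = split_bits_into_blocks_alt bits bs := by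
  intro bits
  induction hn : bits.length using Nat.strong_induction_on generalizing bits with
  | _ n ih =>
    by_cases hb : bits = []
    · subst hb
      rw [pv_A_eq_map [] bs hpos]
      rw [split_bits_into_blocks_alt]
      simp
    · have hlen : 0 < bits.length := List.length_pos_iff.mpr hb
      rw [pv_A_eq_map bits bs hpos, if_pos (by exact_mod_cast hlen)]
      rw [pv_q_shift (bits.length : Int) bs hpos (by exact_mod_cast hlen)]
      rw [List.range_succ_eq_map, List.map_cons, List.map_map]
      have htail : ∀ k ∈ List.range (if 0 < (bits.length : Int) - bs then (((bits.length : Int) - bs + bs - 1) / bs).toNat else 0),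
          (pvG bits bs ∘ Nat.succ) k = pvG (bits.drop bs.toNat) bs k := by
        intro k _
        exact pv_G_shift bits bs hpos k
      rw [List.map_congr_left htail]
      have hlen' : ((bits.drop bs.toNat).length : Int) = (bits.length : Int) - bs ∨
          ((bits.drop bs.toNat).length = 0 ∧ ¬ 0 < (bits.length : Int) - bs) := by
        simp only [List.length_drop]
        omega
      have hmap : (List.range (if 0 < (bits.length : Int) - bs then (((bits.length : Int) - bs + bs - 1) / bs).toNat else 0)).map (pvG (bits.drop bs.toNat) bs)
          = split_bits_into_blocks (bits.drop bs.toNat) bs := by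
        rw [pv_A_eq_map (bits.drop bs.toNat) bs hpos]
        rcases hlen' with h | ⟨h1, h2⟩
        · rw [h]
        · rw [h1, if_neg h2]
          simp
      rw [hmap, ih (bits.drop bs.toNat).length (by simp only [List.length_drop]; omega) _ rfl]
      conv_rhs => rw [split_bits_into_blocks_alt]
      rw [dif_neg (by omega : ¬ bs ≤ 0), dif_neg hb]
      rw [pv_G_zero bits bs]
      rw [PySem.List.slice_from bits hpos.le]

-- ===== VERDICT (by name: the statement is the Claim_ definition above) =====
theorem split_bits_into_blocks_spec : Claim_equal_split_bits_into_blocks := by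
  intro bits bs _ hpre
  unfold Spec_split_bits_into_blocks
  rcases lt_or_gt_of_ne hpre with hneg | hpos
  · unfold split_bits_into_blocks
    rw [pv_pyRange_neg_nil _ _ (by positivity) hneg, split_bits_into_blocks_alt,
      dif_pos (by omega : bs ≤ 0)]
    rfl
  · exact pv_main bs hpos bits
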